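-- pv_equiv track=rewrite | github.com/NeoLoon/Maplestory_Bot_KR_EN | module/simbol.py | simbol1
-- ===== SOURCE A (Python) =====
-- def simbol1(a, b):
--     result1 = 0
--     result2 = 0
--     for i in range(1, a):
--         result1 += (i * i) + 11
--     for i in range(1, b):
--         result2 += (i * i) + 11
--     result = result2 - result1
--     return format(result, ',')
-- ===== SOURCE B (Python) =====
-- def simbol1(a, b):
--     def s(n):
--         m = n - 1
--         if m < 0:
--             m = 0
--         return m * (m + 1) * (2 * m + 1) // 6 + 11 * m
--     return format(s(b) - s(a), ',')
-- ===== Notes on version B (the rewrite author's own statement) =====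
-- stated objective: faster
-- what changed: replaces the two O(a)/O(b) summation loops by the closed form sum_{i=1}^{m} i^2 = m(m+1)(2m+1)/6 plus 11*m for each bound, computed in O(1)
import Mathlib
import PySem

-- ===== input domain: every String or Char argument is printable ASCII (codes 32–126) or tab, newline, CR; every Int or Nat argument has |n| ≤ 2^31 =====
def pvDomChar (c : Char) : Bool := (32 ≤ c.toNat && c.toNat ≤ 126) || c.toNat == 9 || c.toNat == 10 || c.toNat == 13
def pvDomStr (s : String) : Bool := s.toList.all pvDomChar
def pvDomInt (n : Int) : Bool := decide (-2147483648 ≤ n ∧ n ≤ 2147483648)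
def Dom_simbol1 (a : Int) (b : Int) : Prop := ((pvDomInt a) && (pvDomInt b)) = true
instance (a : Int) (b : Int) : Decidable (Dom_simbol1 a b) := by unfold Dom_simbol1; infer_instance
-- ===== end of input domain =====

-- B replaces A's two summation loops by the closed form m(m+1)(2m+1)/6 + 11m (O(1) instead of O(a+b)).
-- pvCommaFmt is the shared port of Python's format(n, ','), which both Pythons call: digits of |n|
-- grouped in threes from the right with ',', '-' prefixed for negative n. Exact for every Int.

-- shared helper: format(n, ',')
def pvGroupRev : List Char → List Char
  | a :: b :: c :: d :: rest => a :: b :: c :: ',' :: pvGroupRev (d :: rest)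
  | l => l

def pvCommaFmt (n : Int) : String :=
  let ds := PySem.Int.toChars (Int.ofNat n.natAbs)
  let g := (pvGroupRev ds.reverse).reverse
  String.ofList (if n < 0 then '-' :: g else g)

-- ===== PORT A =====
def simbol1 (a : Int) (b : Int) : String :=
  let result1 := (PySem.List.pyRange 1 a 1).foldl (fun acc i => acc + (i * i + 11)) 0
  let result2 := (PySem.List.pyRange 1 b 1).foldl (fun acc i => acc + (i * i + 11)) 0
  pvCommaFmt (result2 - result1)

-- ===== PORT B =====
def pvS (n : Int) : Int :=
  let m := n - 1
  let m := if m < 0 then 0 else m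
  PySem.Int.floordiv (m * (m + 1) * (2 * m + 1)) 6 + 11 * m

def simbol1_alt (a : Int) (b : Int) : String :=
  pvCommaFmt (pvS b - pvS a)

-- ===== PRECONDITION & SPEC =====
def Spec_simbol1 (a : Int) (b : Int) (out : String) : Prop := out = simbol1_alt a b
instance (a : Int) (b : Int) (out : String) : Decidable (Spec_simbol1 a b out) := by unfold Spec_simbol1; infer_instance

-- ===== CLAIM (what is proved, stated in full; the proofs are below) =====
def Claim_equal_simbol1 : Prop := ∀ (a : Int) (b : Int), Dom_simbol1 a b → Spec_simbol1 a b (simbol1 a b)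

-- ===== LEMMAS AND PROOFS =====

theorem pv_six_dvd (m : Int) : (6 : Int) ∣ m * (m + 1) * (2 * m + 1) := by
  have h2 : (2 : Int) ∣ m * (m + 1) * (2 * m + 1) :=
    Dvd.dvd.mul_right (Int.even_mul_succ_self m).two_dvd _
  have h3 : (3 : Int) ∣ m * (m + 1) * (2 * m + 1) := by
    have h := Int.emod_emod_of_dvd m (dvd_refl 3)
    have hb : m % 3 = 0 ∨ m % 3 = 1 ∨ m % 3 = 2 := by omega
    obtain ⟨k, hk⟩ : ∃ k, m = 3 * k + m % 3 := ⟨m / 3, by omega⟩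
    rcases hb with h | h | h <;> rw [h] at hk <;> subst hk
    · exact ⟨k * (3 * k + 0 + 1) * (2 * (3 * k + 0) + 1), by ring⟩
    · exact ⟨(3 * k + 1) * (3 * k + 2) * (2 * k + 1), by ring⟩
    · exact ⟨(3 * k + 2) * (k + 1) * (2 * (3 * k + 2) + 1), by ring⟩
  omega

theorem pv_floordiv_six (q : Int) : PySem.Int.floordiv (6 * q) 6 = q := by
  rw [PySem.Int.floordiv_eq_ediv_of_pos (by omega)]
  exact Int.mul_ediv_cancel_left q (by omega)

theorem pv_sum_eq (n : Int) :
    (PySem.List.pyRange 1 n 1).foldl (fun acc i => acc + (i * i + 11)) 0 = pvS n := by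
  by_cases h : n ≤ 1
  · rw [PySem.List.pyRange_one_eq_nil h]
    simp only [List.foldl_nil, pvS]
    have : (if n - 1 < 0 then (0 : Int) else n - 1) = 0 := by omega
    rw [this]
    norm_num [PySem.Int.floordiv]
  · -- n = k + 1 for some k : Nat with k ≥ 1
    have haux : ∀ k : Nat,
        (PySem.List.pyRange 1 ((k : Int) + 1) 1).foldl (fun acc i => acc + (i * i + 11)) 0
          = pvS ((k : Int) + 1) := by
      intro k
      induction k with
      | zero =>
        rw [PySem.List.pyRange_one_eq_nil (by omega)]
        simp [pvS, PySem.Int.floordiv]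
      | succ k ih =>
        have hsp : ((k : Int) + 1 + 1) = ((k : Int) + 1) + 1 := by push_cast; ring
        rw [show ((k + 1 : Nat) : Int) + 1 = ((k : Int) + 1) + 1 by push_cast; ring,
            PySem.List.pyRange_one_succ_right (by omega), List.foldl_append, ih]
        simp only [List.foldl_cons, List.foldl_nil]
        -- reduce both pvS values via the divisibility quotients
        obtain ⟨q, hq⟩ := pv_six_dvd (k : Int)
        obtain ⟨q', hq'⟩ := pv_six_dvd ((k : Int) + 1)
        have hS1 : pvS ((k : Int) + 1) = q + 11 * (k : Int) := by
          simp only [pvS]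
          have : ((k : Int) + 1 - 1) = (k : Int) := by ring
          rw [this]
          rw [if_neg (by omega), hq, pv_floordiv_six]
        have hS2 : pvS (((k : Int) + 1) + 1) = q' + 11 * ((k : Int) + 1) := by
          simp only [pvS]
          have : ((k : Int) + 1 + 1 - 1) = (k : Int) + 1 := by ring
          rw [this]
          rw [if_neg (by omega), hq', pv_floordiv_six]
        rw [hS1, hS2]
        have h6 : 6 * q' = 6 * q + 6 * (((k : Int) + 1) * ((k : Int) + 1)) := by
          linear_combination hq - hq'
        have hstep : q' = q + ((k : Int) + 1) * ((k : Int) + 1) := by linarith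
        rw [hstep]; ring
    have hk : n = ((n - 1).toNat : Int) + 1 := by omega
    rw [hk]; exact haux _

-- ===== VERDICT (by name: the statement is the Claim_ definition above) =====
theorem simbol1_spec : Claim_equal_simbol1 := by
  intro a b _
  unfold Spec_simbol1 simbol1 simbol1_alt
  rw [pv_sum_eq a, pv_sum_eq b]
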